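-- pv_equiv track=rewrite | github.com/blcklamb/baekjoon-python | num1012.py | checkIfAdjac
-- ===== SOURCE A (Python) =====
-- def checkIfAdjac(list, spot):
--   minusNum = 0
--   spotX = spot[0]
--   spotY = spot[1]
--   for i in list:
--       if i[0] == spotX:
--           if i[1] - 1 == spotY:
--             minusNum += 1
--           elif i[1] + 1 == spotY:
--             minusNum += 1
--       elif i[1] == spotY:
--           if i[0] - 1 == spotX:
--             minusNum += 1
--           elif i[0] + 1 == spotX:
--             minusNum += 1
--   return minusNum
-- ===== SOURCE B (Python) =====
-- def checkIfAdjac(list, spot):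
--     spotX, spotY = spot
--     return (list.count((spotX, spotY - 1))
--             + list.count((spotX, spotY + 1))
--             + list.count((spotX - 1, spotY))
--             + list.count((spotX + 1, spotY)))
-- ===== Notes on version B (the rewrite author's own statement) =====
-- stated objective: idiomatic
-- what changed: Instead of one pass with a nested equality-branch tree, B makes four staged counting passes, one list.count per orthogonal neighbor coordinate, and sums the four counts (correct because the four neighbor points are pairwise distinct, so no element is counted twice).
import Mathlib
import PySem

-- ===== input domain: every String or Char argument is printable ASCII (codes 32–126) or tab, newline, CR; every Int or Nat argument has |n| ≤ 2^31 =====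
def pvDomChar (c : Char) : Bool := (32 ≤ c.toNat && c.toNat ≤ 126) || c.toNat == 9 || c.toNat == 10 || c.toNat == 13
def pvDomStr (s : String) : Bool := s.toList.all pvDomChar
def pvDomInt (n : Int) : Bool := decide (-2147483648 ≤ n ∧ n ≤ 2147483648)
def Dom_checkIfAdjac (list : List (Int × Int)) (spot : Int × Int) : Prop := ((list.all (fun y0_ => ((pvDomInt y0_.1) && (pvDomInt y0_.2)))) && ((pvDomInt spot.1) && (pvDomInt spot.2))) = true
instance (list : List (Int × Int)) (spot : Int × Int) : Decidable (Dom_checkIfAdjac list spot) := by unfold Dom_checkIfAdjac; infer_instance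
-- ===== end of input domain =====

-- B replaces A's single pass of nested equality branches by four staged counting passes
-- (one list.count per orthogonal neighbor), summed; idiomatic rewrite, same cost.
-- ===== PORT A =====
def checkIfAdjac (list : List (Int × Int)) (spot : Int × Int) : Int :=
  let spotX := spot.1
  let spotY := spot.2
  list.foldl (fun minusNum i =>
    if i.1 == spotX then
      if i.2 - 1 == spotY then minusNum + 1
      else if i.2 + 1 == spotY then minusNum + 1
      else minusNum
    else if i.2 == spotY then
      if i.1 - 1 == spotX then minusNum + 1
      else if i.1 + 1 == spotX then minusNum + 1
      else minusNum
    else minusNum) 0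

-- ===== PORT B =====
def checkIfAdjac_alt (list : List (Int × Int)) (spot : Int × Int) : Int :=
  let spotX := spot.1
  let spotY := spot.2
  (PySem.List.count list (spotX, spotY - 1) : Int)
    + (PySem.List.count list (spotX, spotY + 1) : Int)
    + (PySem.List.count list (spotX - 1, spotY) : Int)
    + (PySem.List.count list (spotX + 1, spotY) : Int)

-- ===== PRECONDITION & SPEC =====
def Spec_checkIfAdjac (list : List (Int × Int)) (spot : Int × Int) (out : Int) : Prop := out = checkIfAdjac_alt list spot
instance (list : List (Int × Int)) (spot : Int × Int) (out : Int) : Decidable (Spec_checkIfAdjac list spot out) := by unfold Spec_checkIfAdjac; infer_instance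

-- ===== CLAIM =====
def Claim_equal_checkIfAdjac : Prop := ∀ (list : List (Int × Int)) (spot : Int × Int), Dom_checkIfAdjac list spot → Spec_checkIfAdjac list spot (checkIfAdjac list spot)

-- ===== LEMMAS AND PROOFS =====
-- A's fold with accumulator c equals c plus the sum of the four neighbor counts.
theorem foldl_eq_counts (list : List (Int × Int)) (x y : Int) (c : Int) :
    list.foldl (fun minusNum i =>
      if i.1 == x then
        if i.2 - 1 == y then minusNum + 1
        else if i.2 + 1 == y then minusNum + 1
        else minusNum
      else if i.2 == y then
        if i.1 - 1 == x then minusNum + 1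
        else if i.1 + 1 == x then minusNum + 1
        else minusNum
      else minusNum) c
    = c + (PySem.List.count list (x, y - 1) : Int)
        + (PySem.List.count list (x, y + 1) : Int)
        + (PySem.List.count list (x - 1, y) : Int)
        + (PySem.List.count list (x + 1, y) : Int) := by
  induction list generalizing c with
  | nil => simp [PySem.List.count]
  | cons h t ih =>
    rw [List.foldl_cons]
    simp only [PySem.List.count, List.count_cons]
    have ht := ih (c := (if (h.1 == x) = true then
        if (h.2 - 1 == y) = true then c + 1 else if (h.2 + 1 == y) = true then c + 1 else c
      else if (h.2 == y) = true then
        if (h.1 - 1 == x) = true then c + 1 else if (h.1 + 1 == x) = true then c + 1 else c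
      else c))
    simp only [PySem.List.count] at ht
    rw [ht]
    obtain ⟨a, b⟩ := h
    simp only [beq_iff_eq, Prod.mk.injEq]
    split_ifs <;> push_cast <;> omega

-- ===== VERDICT =====
theorem checkIfAdjac_spec : Claim_equal_checkIfAdjac := by
  intro list spot _
  unfold Spec_checkIfAdjac checkIfAdjac checkIfAdjac_alt
  rw [foldl_eq_counts]
  ring
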